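-- pv_equiv track=rewrite | github.com/mustafakucukdemirci/Bioinformatics-Algorithms | lecture2.py | findAllKmer
-- ===== SOURCE A (Python) =====
-- def findAllKmer(k,text):
--     counts = dict()
--
--     for i in range(len(text)-k):
--         if(text[i:i+k] in counts.keys()):
--             counts[text[i:i+k]] += 1
--         else:
--             counts[text[i:i+k]] = 1
--     return counts
-- ===== SOURCE B (Python) =====
-- def findAllKmer(k, text):
--     # Collect every k-mer slice first, then tally: for each first occurrence,
--     # one count() scan over the collected list gives its total.
--     kmers = [text[i:i + k] for i in range(len(text) - k)]
--     counts = dict()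
--     for km in kmers:
--         if km not in counts:
--             counts[km] = kmers.count(km)
--     return counts
-- ===== Notes on version B (the rewrite author's own statement) =====
-- stated objective: alternative
-- what changed: B first materialises the list of all k-mer slices, then builds the dict by, at each first occurrence, tallying that k-mer with one count() scan over the collected list, instead of A's per-step dict increments.
import Mathlib
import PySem

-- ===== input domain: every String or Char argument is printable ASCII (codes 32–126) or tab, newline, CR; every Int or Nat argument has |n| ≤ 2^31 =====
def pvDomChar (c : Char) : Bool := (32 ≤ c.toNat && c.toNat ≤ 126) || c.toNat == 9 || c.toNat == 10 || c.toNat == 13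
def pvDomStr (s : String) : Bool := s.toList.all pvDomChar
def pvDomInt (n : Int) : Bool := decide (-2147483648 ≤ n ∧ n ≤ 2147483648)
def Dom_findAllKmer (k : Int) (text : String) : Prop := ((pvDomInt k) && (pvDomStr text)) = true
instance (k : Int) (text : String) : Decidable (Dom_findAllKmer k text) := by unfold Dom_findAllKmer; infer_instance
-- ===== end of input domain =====

-- B collects the list of k-mer slices first and tallies each first occurrence with one count() scan,
-- instead of A's running per-step dict increments (objective: alternative decomposition, not faster).

-- ===== PORT A =====
def findAllKmer (k : Int) (text : String) : List (String × Int) :=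
  ((PySem.List.pyRange 0 (PySem.Str.len text - k) 1).foldl
    (fun counts i =>
      if counts.contains (PySem.Str.slice text (some i) (some (i + k))) then
        counts.modify (PySem.Str.slice text (some i) (some (i + k))) 0 (· + 1)
      else
        counts.insert (PySem.Str.slice text (some i) (some (i + k))) 1)
    PySem.Dict.empty).items

-- ===== PORT B =====
def findAllKmer_alt (k : Int) (text : String) : List (String × Int) :=
  let kmers := (PySem.List.pyRange 0 (PySem.Str.len text - k) 1).map
      (fun i => PySem.Str.slice text (some i) (some (i + k)))
  (kmers.foldl
    (fun counts km =>
      if counts.contains km then counts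
      else counts.insert km ((kmers.count km : Int)))
    PySem.Dict.empty).items

-- ===== PRECONDITION & SPEC =====
def Spec_findAllKmer (k : Int) (text : String) (out : List (String × Int)) : Prop := out = findAllKmer_alt k text
instance (k : Int) (text : String) (out : List (String × Int)) : Decidable (Spec_findAllKmer k text out) := by unfold Spec_findAllKmer; infer_instance

-- ===== CLAIM (what is proved, stated in full; the proofs are below) =====
def Claim_equal_findAllKmer : Prop := ∀ (k : Int) (text : String), Dom_findAllKmer k text → Spec_findAllKmer k text (findAllKmer k text)

-- ===== LEMMAS AND PROOFS =====

-- A's loop body is exactly the Counter step.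
theorem stepA_eq_counter_step (d : PySem.Dict String Int) (x : String) :
    (if d.contains x then d.modify x 0 (· + 1) else d.insert x 1) = d.modify x 0 (· + 1) := by
  by_cases h : d.contains x = true
  · simp [h]
  · simp only [Bool.not_eq_true] at h
    simp only [h]
    rw [PySem.Dict.modify]; simp [PySem.Dict.getD_of_not_contains, h]

-- A's fold is Counter of the k-mer list: items = first occurrences paired with their counts.
theorem findAllKmer_eq_items_counter (k : Int) (text : String) :
    findAllKmer k text =
      (PySem.Set.ofList ((PySem.List.pyRange 0 (PySem.Str.len text - k) 1).map
        (fun i => PySem.Str.slice text (some i) (some (i + k))))).map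
        (fun s => (s, (((PySem.List.pyRange 0 (PySem.Str.len text - k) 1).map
          (fun i => PySem.Str.slice text (some i) (some (i + k)))).count s : Int))) := by
  unfold findAllKmer
  rw [← List.foldl_map (f := fun i => PySem.Str.slice text (some i) (some (i + k)))
      (g := fun (d : PySem.Dict String Int) x =>
        if d.contains x then d.modify x 0 (· + 1) else d.insert x 1)]
  have hfun : (fun (d : PySem.Dict String Int) (x : String) =>
      if d.contains x then d.modify x 0 (· + 1) else d.insert x 1)
      = fun d x => d.modify x 0 (· + 1) := funext fun d => funext fun x => stepA_eq_counter_step d x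
  rw [hfun, ← PySem.Dict.counter_eq_foldl, PySem.Dict.items_counter]

-- B's fold, generalized over the accumulator: it appends the not-yet-seen first occurrences,
-- each paired with its precomputed tally c.
theorem bfold_items (c : String → Int) (M : List String) (d : PySem.Dict String Int) :
    (M.foldl (fun d km => if d.contains km then d else d.insert km (c km)) d).items
      = d.items ++ ((PySem.Set.ofList M).filter (fun s => !(d.contains s))).map (fun s => (s, c s)) := by
  induction M generalizing d with
  | nil => simp [PySem.Set.ofList]
  | cons x M ih =>
    simp only [List.foldl_cons, PySem.Set.ofList_cons x M, PySem.Set.discard, List.filter_cons]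
    by_cases h : d.contains x = true
    · rw [if_pos h, ih]
      have hx : (!(d.contains x)) = false := by simp [h]
      simp only [hx, Bool.false_eq_true, List.filter_filter]
      congr 2
      apply List.filter_congr
      intro y _
      by_cases hyx : y = x
      · simp [hyx, h]
      · simp [hyx]
    · simp only [Bool.not_eq_true] at h
      rw [if_neg (by simp [h]), ih, PySem.Dict.items_insert_of_not_contains d (c x) h]
      have hx : (!(d.contains x)) = true := by simp [h]
      simp only [hx, if_pos, List.filter_filter, List.map_cons, List.append_assoc,
        List.singleton_append]
      congr 3
      apply List.filter_congr
      intro y _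
      rw [PySem.Dict.contains_insert]
      by_cases hyx : y = x
      · simp [hyx, h]
      · simp [Bool.and_comm]

-- ===== VERDICT (by name: the statement is the Claim_ definition above) =====
theorem findAllKmer_spec : Claim_equal_findAllKmer := by
  intro k text _
  unfold Spec_findAllKmer findAllKmer_alt
  rw [findAllKmer_eq_items_counter, bfold_items]
  simp [PySem.Dict.empty]
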